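-- pv_equiv track=rewrite | github.com/wj210/NLI_ETP | preprocess/preprocess_eraser.py | check_esnli
-- ===== SOURCE A (Python) =====
-- def check_esnli(dataline):
--     all_docids = []
--     for ee in dataline['evidences']:
--         for e in ee:
--             all_docids.append(e['docid'])
--     all_docids = list(set(all_docids))
--     doc_labels = [d.rsplit('_',1)[-1] for d in all_docids]
--     if 'premise' in doc_labels and 'hypothesis' in doc_labels:
--         return True
--     else:
--         return False
-- ===== SOURCE B (Python) =====
-- def check_esnli(dataline):
--     saw_premise = False
--     saw_hypothesis = False
--     for ee in dataline['evidences']: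
--         for e in ee:
--             suffix = e['docid'].rsplit('_', 1)[-1]
--             if suffix == 'premise':
--                 saw_premise = True
--             elif suffix == 'hypothesis':
--                 saw_hypothesis = True
--     return saw_premise and saw_hypothesis
-- ===== Notes on version B (the rewrite author's own statement) =====
-- stated objective: simpler
-- what changed: Replaces the build-list/dedup-to-set/map-suffixes/two-membership-tests pipeline with a single nested pass carrying two boolean flags that are set as soon as a premise/hypothesis suffix is seen.
import Mathlib
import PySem

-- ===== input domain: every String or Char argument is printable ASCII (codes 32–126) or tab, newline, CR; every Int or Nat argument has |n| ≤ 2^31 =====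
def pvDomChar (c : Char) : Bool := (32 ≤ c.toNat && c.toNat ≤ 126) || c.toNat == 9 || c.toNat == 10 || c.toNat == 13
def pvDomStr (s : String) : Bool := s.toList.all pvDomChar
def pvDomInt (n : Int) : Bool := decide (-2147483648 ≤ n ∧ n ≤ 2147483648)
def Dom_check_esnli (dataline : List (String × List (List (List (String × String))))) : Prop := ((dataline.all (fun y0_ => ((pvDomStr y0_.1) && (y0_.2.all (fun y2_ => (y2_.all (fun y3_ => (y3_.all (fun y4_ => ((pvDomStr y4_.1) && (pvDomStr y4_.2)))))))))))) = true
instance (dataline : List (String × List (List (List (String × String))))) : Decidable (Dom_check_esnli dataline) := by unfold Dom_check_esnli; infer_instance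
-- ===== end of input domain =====

-- ===== PORT A =====
-- B replaces A's build-list/dedup-to-set/map-suffixes/two-membership-tests pipeline with one nested pass over two boolean flags (simpler; same cost).
-- d.rsplit('_', 1)[-1]: the part of the string after the last '_' (the whole string if there is no '_'); exact by hand.
def pyLastLabel (s : String) : String :=
  String.mk ((s.toList.reverse.takeWhile (fun c => !(c == '_'))).reverse)

def check_esnli (dataline : List (String × List (List (List (String × String))))) : Bool :=
  let all_docids :=
    ((PySem.Dict.mk dataline).getD "evidences" []).foldl
      (fun acc ee => ee.foldl (fun acc e => acc ++ [(PySem.Dict.mk e).getD "docid" ""]) acc) []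
  let all_docids := PySem.Set.ofList all_docids
  let doc_labels := all_docids.map pyLastLabel
  if doc_labels.contains "premise" && doc_labels.contains "hypothesis" then true else false

-- ===== PORT B =====
def check_esnli_alt (dataline : List (String × List (List (List (String × String))))) : Bool :=
  let flags :=
    ((PySem.Dict.mk dataline).getD "evidences" []).foldl
      (fun fl ee => ee.foldl
        (fun fl e =>
          let suffix := pyLastLabel ((PySem.Dict.mk e).getD "docid" "")
          if suffix = "premise" then (true, fl.2)
          else if suffix = "hypothesis" then (fl.1, true)
          else fl) fl)
      (false, false)
  flags.1 && flags.2

-- ===== PRECONDITION & SPEC =====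
-- Pre_ excludes exactly the inputs where the Python raises KeyError: a missing 'evidences' key, or
-- an evidence dict without a 'docid' key (both A and B index dataline['evidences'] and e['docid']).
def Pre_check_esnli (dataline : List (String × List (List (List (String × String))))) : Prop :=
  (PySem.Dict.mk dataline).contains "evidences" = true ∧
  ∀ ee ∈ (PySem.Dict.mk dataline).getD "evidences" [],
    ∀ e ∈ ee, (PySem.Dict.mk e).contains "docid" = true
instance (dataline : List (String × List (List (List (String × String))))) : Decidable (Pre_check_esnli dataline) := by unfold Pre_check_esnli; infer_instance
def pvWitness_check_esnli : (List (String × List (List (List (String × String))))) :=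
  [("evidences", [[[("docid", "a_premise")], [("docid", "b_hypothesis")]]])]

def Spec_check_esnli (dataline : List (String × List (List (List (String × String))))) (out : Bool) : Prop := out = check_esnli_alt dataline
instance (dataline : List (String × List (List (List (String × String))))) (out : Bool) : Decidable (Spec_check_esnli dataline out) := by unfold Spec_check_esnli; infer_instance

-- ===== CLAIM (what is proved, stated in full; the proofs are below) =====
def Claim_equal_check_esnli : Prop := ∀ (dataline : List (String × List (List (List (String × String))))), Dom_check_esnli dataline → Pre_check_esnli dataline → Spec_check_esnli dataline (check_esnli dataline)

-- ===== LEMMAS AND PROOFS =====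

-- A's docid-gathering inner loop appends the mapped sublist.
theorem gather_inner (f : List (String × String) → String)
    (ee : List (List (String × String))) (acc : List String) :
    ee.foldl (fun acc e => acc ++ [f e]) acc = acc ++ ee.map f := by
  induction ee generalizing acc with
  | nil => simp
  | cons e rest ih => rw [List.foldl_cons, ih]; simp

-- A's double loop gathers the flattened list of docids.
theorem gather_outer (f : List (String × String) → String)
    (evs : List (List (List (String × String)))) (acc : List String) :
    evs.foldl (fun acc ee => ee.foldl (fun acc e => acc ++ [f e]) acc) acc
      = acc ++ (evs.flatMap id).map f := by
  induction evs generalizing acc with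
  | nil => simp
  | cons ee rest ih =>
    rw [List.foldl_cons, gather_inner, ih]
    simp [List.flatMap_cons]

-- B's inner flag loop over one sublist.
theorem flags_inner (f : List (String × String) → String)
    (ee : List (List (String × String))) (fl : Bool × Bool) :
    ee.foldl (fun fl e =>
        if f e = "premise" then (true, fl.2)
        else if f e = "hypothesis" then (fl.1, true)
        else fl) fl
      = (fl.1 || decide (∃ e ∈ ee, f e = "premise"),
         fl.2 || decide (∃ e ∈ ee, f e = "hypothesis")) := by
  induction ee generalizing fl with
  | nil => simp
  | cons e rest ih =>
    rw [List.foldl_cons]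
    by_cases h1 : f e = "premise"
    · rw [if_pos h1, ih]; simp [h1]
    · rw [if_neg h1]
      by_cases h2 : f e = "hypothesis"
      · rw [if_pos h2, ih]; simp [h2]
      · rw [if_neg h2, ih]; simp [h1, h2]

-- B's nested loops compute whether each label occurs anywhere in the evidences.
theorem flags_outer (f : List (String × String) → String)
    (evs : List (List (List (String × String)))) (fl : Bool × Bool) :
    evs.foldl (fun fl ee => ee.foldl
        (fun fl e =>
          if f e = "premise" then (true, fl.2)
          else if f e = "hypothesis" then (fl.1, true)
          else fl) fl) fl
      = (fl.1 || decide (∃ ee ∈ evs, ∃ e ∈ ee, f e = "premise"),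
         fl.2 || decide (∃ ee ∈ evs, ∃ e ∈ ee, f e = "hypothesis")) := by
  induction evs generalizing fl with
  | nil => simp
  | cons ee rest ih =>
    rw [List.foldl_cons, flags_inner, ih]
    simp [Bool.or_assoc]

-- ===== VERDICT (by name: the statement is the Claim_ definition above) =====
theorem check_esnli_spec : Claim_equal_check_esnli := by
  intro dataline _ _
  unfold Spec_check_esnli check_esnli check_esnli_alt
  rw [gather_outer, flags_outer]
  have key : ∀ y : String,
      (y ∈ (PySem.Set.ofList
        ((((PySem.Dict.mk dataline).getD "evidences" []).flatMap id).map
          (fun e => (PySem.Dict.mk e).getD "docid" ""))).map pyLastLabel)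
      ↔ (∃ ee ∈ (PySem.Dict.mk dataline).getD "evidences" [],
          ∃ e ∈ ee, pyLastLabel ((PySem.Dict.mk e).getD "docid" "") = y) := by
    intro y
    simp only [List.mem_map, PySem.Set.mem_ofList, List.mem_flatMap, id_eq]
    constructor
    · rintro ⟨a, ⟨e, ⟨ee, hee, he⟩, rfl⟩, hy⟩
      exact ⟨ee, hee, e, he, hy⟩
    · rintro ⟨ee, hee, e, he, hy⟩
      exact ⟨_, ⟨e, ⟨ee, hee, he⟩, rfl⟩, hy⟩
  simp only [List.nil_append, Bool.false_or, List.contains_eq_mem]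
  rw [decide_eq_decide.mpr (key "premise"), decide_eq_decide.mpr (key "hypothesis")]
  · simp
  · infer_instance
  · infer_instance
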